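-- pv_equiv track=rewrite | github.com/SylwiaHaracz/pp1 | 04-Subroutines/Exercise40.py | f
-- ===== SOURCE A (Python) =====
-- def f(number):
--     zero = 0
--     jeden = 0
--     dwa = 0
--     trzy = 0
--     cztery = 0
--     piec = 0
--     szesc = 0
--     siedem = 0
--     osiem = 0
--     dziewiec =0
--     suma =0
--     number = str(number)
--     for i in range (0,len(number)):
--         if number[i]=='0':
--             zero = zero +1
--         elif number[i]=='1':
--             jeden = jeden +1
--         elif number[i]=='2':
--             dwa = dwa +1
--         elif number[i]=='3':
--             trzy = trzy+1
--         elif number[i]=='4':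
--             cztery = cztery+1
--         elif number[i]=='5':
--             piec = piec+1
--         elif number[i]=='6':
--             szesc = szesc+1
--         elif number[i]=='7':
--             siedem = siedem +1
--         elif number[i]=='8':
--             osiem = osiem +1
--         elif number[i]=='9':
--             dziewiec = dziewiec+1
--         else:
--             return "Give me a number!"
--
--     if jeden<2:
--         jeden = 0
--     if dwa<2:
--         dwa=0
--     if trzy<2:
--         trzy = 0
--     if cztery<2:
--         cztery=0
--     if piec<2:
--         piec=0
--     if szesc<2:
--         szesc=0
--     if siedem<2:
--         siedem = 0
--     if osiem<2:
--         osiem = 0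
--     if dziewiec<2:
--         dziewiec=0
--
--     suma = jeden + dwa*2 +  trzy*3 + cztery*4 + piec*5 + szesc*6 + siedem*7 + osiem*8 + dziewiec*9
--
--     return suma
-- ===== SOURCE B (Python) =====
-- def f(number):
--     s = str(number)
--     if not s.isdigit():
--         return "Give me a number!"
--     t = sorted(s)
--     total = 0
--     i = 0
--     n = len(t)
--     while i < n:
--         j = i
--         while j < n and t[j] == t[i]:
--             j += 1
--         c = j - i
--         if c >= 2:
--             total += (ord(t[i]) - ord('0')) * c
--         i = j
--     return total
-- ===== Notes on version B (the rewrite author's own statement) =====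
-- stated objective: alternative
-- what changed: Replaces the ten hand-named per-digit counters and the nine threshold fix-ups by validate-then-sort: B sorts the digit string and scans maximal runs of equal digits, adding digit*run-length for every run of length >= 2.
-- outside the precondition, e.g. on f(-5): A returns 'Give me a number!', B returns 'Give me a number!'
import Mathlib
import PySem

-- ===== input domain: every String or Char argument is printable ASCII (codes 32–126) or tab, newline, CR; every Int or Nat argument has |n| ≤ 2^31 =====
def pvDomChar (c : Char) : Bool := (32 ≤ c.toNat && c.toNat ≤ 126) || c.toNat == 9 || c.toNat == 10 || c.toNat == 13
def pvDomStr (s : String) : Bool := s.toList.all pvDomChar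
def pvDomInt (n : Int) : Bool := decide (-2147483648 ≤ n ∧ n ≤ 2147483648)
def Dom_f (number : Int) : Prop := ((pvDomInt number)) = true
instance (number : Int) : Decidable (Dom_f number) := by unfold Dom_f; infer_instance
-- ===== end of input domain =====

set_option maxRecDepth 4000


-- B replaces A's ten hand-named per-digit counters and nine threshold fix-ups by
-- validate-then-sort: sort the digit string and scan maximal runs of equal digits,
-- adding digit*run_length for every run of length >= 2 (objective: alternative).

-- ===== PORT A =====
-- A's ten named counters, as a structure of Int fields.
structure PvCounts where
  zero : Int
  jeden : Int
  dwa : Int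
  trzy : Int
  cztery : Int
  piec : Int
  szesc : Int
  siedem : Int
  osiem : Int
  dziewiec : Int
deriving DecidableEq, Repr

-- A's for-loop over str(number); `none` is A's early `return "Give me a number!"`
-- (a string, not an int — those inputs are excluded by Pre_f).
def pvLoopA : List Char → PvCounts → Option PvCounts
  | [], st => some st
  | c :: rest, st =>
    if c = '0' then pvLoopA rest { st with zero := st.zero + 1 }
    else if c = '1' then pvLoopA rest { st with jeden := st.jeden + 1 }
    else if c = '2' then pvLoopA rest { st with dwa := st.dwa + 1 }
    else if c = '3' then pvLoopA rest { st with trzy := st.trzy + 1 }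
    else if c = '4' then pvLoopA rest { st with cztery := st.cztery + 1 }
    else if c = '5' then pvLoopA rest { st with piec := st.piec + 1 }
    else if c = '6' then pvLoopA rest { st with szesc := st.szesc + 1 }
    else if c = '7' then pvLoopA rest { st with siedem := st.siedem + 1 }
    else if c = '8' then pvLoopA rest { st with osiem := st.osiem + 1 }
    else if c = '9' then pvLoopA rest { st with dziewiec := st.dziewiec + 1 }
    else none

def f (number : Int) : Int :=
  match pvLoopA (PySem.Int.toChars number) ⟨0, 0, 0, 0, 0, 0, 0, 0, 0, 0⟩ with
  | none => 0   -- Python returns the string "Give me a number!" here; outside Pre_f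
  | some st =>
    let jeden := if st.jeden < 2 then 0 else st.jeden
    let dwa := if st.dwa < 2 then 0 else st.dwa
    let trzy := if st.trzy < 2 then 0 else st.trzy
    let cztery := if st.cztery < 2 then 0 else st.cztery
    let piec := if st.piec < 2 then 0 else st.piec
    let szesc := if st.szesc < 2 then 0 else st.szesc
    let siedem := if st.siedem < 2 then 0 else st.siedem
    let osiem := if st.osiem < 2 then 0 else st.osiem
    let dziewiec := if st.dziewiec < 2 then 0 else st.dziewiec
    jeden + dwa * 2 + trzy * 3 + cztery * 4 + piec * 5 + szesc * 6 + siedem * 7 + osiem * 8 + dziewiec * 9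

-- ===== PORT B =====
-- Source B's while-loop over the sorted digit string: each outer iteration consumes one
-- maximal run of equal chars (the inner `while t[j]==t[i]` = takeWhile/dropWhile).
def pvDigitRuns : List Char → Int
  | [] => 0
  | c :: rest =>
    let same := rest.takeWhile (fun d => d == c)
    let cnt : Int := (same.length : Int) + 1
    (if 2 ≤ cnt then ((c.toNat : Int) - 48) * cnt else 0)
      + pvDigitRuns (rest.dropWhile (fun d => d == c))
termination_by t => t.length
decreasing_by
  simpa using Nat.lt_succ_of_le (List.length_dropWhile_le _ _)

def f_alt (number : Int) : Int :=
  let s := PySem.Int.toChars number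
  if PySem.Chars.strIsdigit s then
    pvDigitRuns (PySem.List.sorted s (fun c => c) false)
  else 0   -- Python returns the string "Give me a number!" here; outside Pre_f

-- ===== PRECONDITION & SPEC =====
-- Pre_f excludes number < 0: there str(number) contains '-', so Python A returns the
-- string "Give me a number!" — not a value of the declared Int return type.
def Pre_f (number : Int) : Prop := 0 ≤ number
instance (number : Int) : Decidable (Pre_f number) := by unfold Pre_f; infer_instance
def pvWitness_f : Int := 1223334444

def Spec_f (number : Int) (out : Int) : Prop := out = f_alt number
instance (number : Int) (out : Int) : Decidable (Spec_f number out) := by unfold Spec_f; infer_instance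

-- ===== CLAIM (what is proved, stated in full; the proofs are below) =====
def Claim_equal_f : Prop := ∀ (number : Int), Dom_f number → Pre_f number → Spec_f number (f number)

-- ===== LEMMAS AND PROOFS =====

-- the k-th digit character
def pvDchar (k : Nat) : Char := Char.ofNat (48 + k)

-- the common weighted-count expression
def pvW (k : Nat) (m : Nat) : Int := if (m : Int) < 2 then 0 else (k : Int) * m

def pvSpecSum (t : List Char) : Int := ∑ k ∈ Finset.range 10, pvW k (t.count (pvDchar k))

lemma pvDigitChar_isdigit (m : Nat) (h : m < 10) : PySem.Chars.isdigit (Nat.digitChar m) = true := by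
  interval_cases m <;> decide

lemma pvToDigitsCore_digits :
    ∀ (fuel n : Nat) (acc : List Char), (∀ c ∈ acc, PySem.Chars.isdigit c = true) →
      ∀ c ∈ Nat.toDigitsCore 10 fuel n acc, PySem.Chars.isdigit c = true := by
  intro fuel
  induction fuel with
  | zero => intro n acc hacc c hc; exact hacc c hc
  | succ fuel ih =>
    intro n acc hacc c hc
    simp only [Nat.toDigitsCore] at hc
    have hd : PySem.Chars.isdigit (Nat.digitChar (n % 10)) = true :=
      pvDigitChar_isdigit _ (Nat.mod_lt _ (by norm_num))
    split at hc
    · rcases List.mem_cons.mp hc with rfl | h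
      · exact hd
      · exact hacc c h
    · exact ih _ _ (by
        intro x hx
        rcases List.mem_cons.mp hx with rfl | h
        · exact hd
        · exact hacc x h) c hc

lemma pvToDigitsCore_ne_nil_of_acc :
    ∀ (fuel n : Nat) (acc : List Char), acc ≠ [] → Nat.toDigitsCore 10 fuel n acc ≠ [] := by
  intro fuel
  induction fuel with
  | zero => intro n acc h; simpa [Nat.toDigitsCore] using h
  | succ fuel ih =>
    intro n acc h
    simp only [Nat.toDigitsCore]
    split
    · simp
    · exact ih _ _ (by simp)

lemma pvToDigits_ne_nil (n : Nat) : Nat.toDigits 10 n ≠ [] := by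
  unfold Nat.toDigits
  simp only [Nat.toDigitsCore]
  split
  · simp
  · exact pvToDigitsCore_ne_nil_of_acc _ _ _ (by simp)

lemma pvToDigits_digits (n : Nat) : ∀ c ∈ Nat.toDigits 10 n, PySem.Chars.isdigit c = true :=
  pvToDigitsCore_digits _ _ _ (by simp)

-- the ten concrete digit characters
lemma pvDigit_enum (c : Char) (h : PySem.Chars.isdigit c = true) :
    c = '0' ∨ c = '1' ∨ c = '2' ∨ c = '3' ∨ c = '4' ∨
    c = '5' ∨ c = '6' ∨ c = '7' ∨ c = '8' ∨ c = '9' := by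
  simp only [PySem.Chars.isdigit, Bool.and_eq_true, decide_eq_true_eq] at h
  obtain ⟨h1, h2⟩ := h
  have hv1 : 48 ≤ c.toNat := h1
  have hv2 : c.toNat ≤ 57 := h2
  have henum : c.toNat = 48 ∨ c.toNat = 49 ∨ c.toNat = 50 ∨ c.toNat = 51 ∨
      c.toNat = 52 ∨ c.toNat = 53 ∨ c.toNat = 54 ∨ c.toNat = 55 ∨
      c.toNat = 56 ∨ c.toNat = 57 := by omega
  rcases henum with h | h | h | h | h | h | h | h | h | h <;>
    rw [← Char.ofNat_toNat c, h] <;> decide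

-- A's loop counts every digit
lemma pvLoopA_eq (s : List Char) (h : ∀ c ∈ s, PySem.Chars.isdigit c = true) :
    ∀ st : PvCounts,
      pvLoopA s st = some ⟨st.zero + s.count '0', st.jeden + s.count '1', st.dwa + s.count '2',
        st.trzy + s.count '3', st.cztery + s.count '4', st.piec + s.count '5',
        st.szesc + s.count '6', st.siedem + s.count '7', st.osiem + s.count '8',
        st.dziewiec + s.count '9'⟩ := by
  induction s with
  | nil => intro st; simp [pvLoopA]
  | cons c rest ih =>
    intro st
    have hrest : ∀ x ∈ rest, PySem.Chars.isdigit x = true :=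
      fun x hx => h x (List.mem_cons_of_mem _ hx)
    have hc := pvDigit_enum c (h c List.mem_cons_self)
    rcases hc with rfl | rfl | rfl | rfl | rfl | rfl | rfl | rfl | rfl | rfl <;>
      simp [pvLoopA, ih hrest] <;> ring_nf

lemma pvDchar_inj {k k' : Nat} (hk : k < 10) (hk' : k' < 10) (h : pvDchar k = pvDchar k') :
    k = k' := by
  have := congrArg Char.toNat h
  unfold pvDchar at this
  simp only [Char.ofNat] at this
  rw [dif_pos (by omega : Nat.isValidChar (48 + k)), dif_pos (by omega : Nat.isValidChar (48 + k'))] at this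
  simp only [Char.toNat] at this
  have h1 : (48 + k) % 4294967296 = 48 + k := Nat.mod_eq_of_lt (by omega)
  have h2 : (48 + k') % 4294967296 = 48 + k' := Nat.mod_eq_of_lt (by omega)
  simp at this
  omega

lemma pvDchar_of_isdigit (c : Char) (h : PySem.Chars.isdigit c = true) :
    ∃ k, k < 10 ∧ pvDchar k = c ∧ (c.toNat : Int) - 48 = (k : Int) := by
  rcases pvDigit_enum c h with rfl|rfl|rfl|rfl|rfl|rfl|rfl|rfl|rfl|rfl
  · exact ⟨0, by norm_num, by decide, by decide⟩
  · exact ⟨1, by norm_num, by decide, by decide⟩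
  · exact ⟨2, by norm_num, by decide, by decide⟩
  · exact ⟨3, by norm_num, by decide, by decide⟩
  · exact ⟨4, by norm_num, by decide, by decide⟩
  · exact ⟨5, by norm_num, by decide, by decide⟩
  · exact ⟨6, by norm_num, by decide, by decide⟩
  · exact ⟨7, by norm_num, by decide, by decide⟩
  · exact ⟨8, by norm_num, by decide, by decide⟩
  · exact ⟨9, by norm_num, by decide, by decide⟩

-- drop of a run from a sorted list contains no further copies of the run's value
lemma pvDropWhile_not_mem (c : Char) :
    ∀ (l : List Char), l.Pairwise (· ≤ ·) → (∀ x ∈ l, c ≤ x) →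
      ∀ x ∈ l.dropWhile (fun d => d == c), x ≠ c := by
  intro l
  induction l with
  | nil => intro _ _ x hx; simp [List.dropWhile] at hx
  | cons d ds ih =>
    intro hp hge x hx
    rw [List.pairwise_cons] at hp
    by_cases hdc : d = c
    · subst hdc
      rw [List.dropWhile_cons_of_pos (by simp)] at hx
      exact ih hp.2 (fun y hy => hge y (List.mem_cons_of_mem _ hy)) x hx
    · rw [List.dropWhile_cons_of_neg (by simpa using hdc)] at hx
      have hcd : c < d := lt_of_le_of_ne (hge d List.mem_cons_self) (Ne.symm hdc)
      rcases List.mem_cons.mp hx with rfl | hx'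
      · exact hdc
      · exact fun hxc => absurd (hxc ▸ hp.1 x hx') (not_le.mpr hcd)

-- B's run scan over a sorted digit list computes the weighted-count sum
lemma pvRuns_aux : ∀ (n : Nat) (t : List Char), t.length ≤ n → t.Pairwise (· ≤ ·) →
    (∀ c ∈ t, PySem.Chars.isdigit c = true) → pvDigitRuns t = pvSpecSum t := by
  intro n
  induction n with
  | zero =>
    intro t ht _ _
    rw [List.length_eq_zero_iff.mp (Nat.le_zero.mp ht)]
    rw [pvDigitRuns]
    simp [pvSpecSum, pvW]
  | succ n ih =>
    intro t ht hp hd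
    match t with
    | [] =>
      rw [pvDigitRuns]
      simp [pvSpecSum, pvW]
    | c :: rest =>
      rw [List.pairwise_cons] at hp
      set same := rest.takeWhile (fun d => d == c) with hsamedef
      set drop := rest.dropWhile (fun d => d == c) with hdropdef
      have hsplit : same ++ drop = rest := List.takeWhile_append_dropWhile
      have hsame : ∀ x ∈ same, c = x := by
        intro x hx
        rw [hsamedef] at hx
        have hbeq := List.mem_takeWhile_imp (p := fun d => d == c) (l := rest) (x := x) hx
        have hxc : x = c := by simpa using hbeq
        exact hxc.symm
      have hnotc : ∀ x ∈ drop, x ≠ c :=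
        pvDropWhile_not_mem c rest hp.2 (fun x hx => hp.1 x hx)
      have hdropcount : drop.count c = 0 :=
        List.count_eq_zero.mpr (fun hc => hnotc c hc rfl)
      have hcount_c : (c :: rest).count c = same.length + 1 := by
        rw [List.count_cons_self, ← hsplit, List.count_append,
          List.count_eq_length.mpr hsame, hdropcount]
      have hcount_ne : ∀ d : Char, d ≠ c → (c :: rest).count d = drop.count d := by
        intro d hdc
        rw [List.count_cons_of_ne (Ne.symm hdc), ← hsplit, List.count_append,
          List.count_eq_zero.mpr (fun hmem => hdc (hsame d hmem).symm)]
        omega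
      have hdlen : drop.length ≤ n := by
        have h1 : drop.length ≤ rest.length := List.length_dropWhile_le _ _
        have h2 : rest.length + 1 ≤ n + 1 := by simpa using ht
        omega
      have hddig : ∀ x ∈ drop, PySem.Chars.isdigit x = true := by
        intro x hx
        exact hd x (List.mem_cons_of_mem _ ((List.dropWhile_sublist _).mem hx))
      have hdp : drop.Pairwise (· ≤ ·) := List.Pairwise.sublist (List.dropWhile_sublist _) hp.2
      obtain ⟨k₀, hk₀lt, hk₀c, hk₀v⟩ := pvDchar_of_isdigit c (hd c List.mem_cons_self)
      have hmem : k₀ ∈ Finset.range 10 := Finset.mem_range.mpr hk₀lt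
      have hsum_t : pvSpecSum (c :: rest)
          = pvW k₀ (same.length + 1) + ∑ k ∈ (Finset.range 10).erase k₀, pvW k (drop.count (pvDchar k)) := by
        unfold pvSpecSum
        rw [← Finset.add_sum_erase _ _ hmem, hk₀c, hcount_c]
        congr 1
        refine Finset.sum_congr rfl fun k hk => ?_
        have hkk₀ : k ≠ k₀ := (Finset.mem_erase.mp hk).1
        have hklt : k < 10 := Finset.mem_range.mp (Finset.mem_erase.mp hk).2
        have hne : pvDchar k ≠ c := by
          intro hc
          exact hkk₀ (pvDchar_inj hklt hk₀lt (hc.trans hk₀c.symm))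
        rw [hcount_ne _ hne]
      have hsum_d : pvSpecSum drop
          = ∑ k ∈ (Finset.range 10).erase k₀, pvW k (drop.count (pvDchar k)) := by
        unfold pvSpecSum
        rw [← Finset.add_sum_erase _ _ hmem, hk₀c, hdropcount]
        simp [pvW]
      rw [pvDigitRuns]
      rw [ih drop hdlen hdp hddig, hsum_t, hsum_d]
      have hterm : (if 2 ≤ (same.length : Int) + 1 then ((c.toNat : Int) - 48) * ((same.length : Int) + 1) else 0)
          = pvW k₀ (same.length + 1) := by
        unfold pvW
        rw [hk₀v]
        by_cases hl : (2 : Int) ≤ (same.length : Int) + 1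
        · rw [if_pos hl, if_neg (by push_cast; omega)]
          push_cast; ring
        · rw [if_neg hl, if_pos (by push_cast; omega)]
      rw [hterm]

lemma pvDigitRuns_sorted (t : List Char) (hs : t.Pairwise (· ≤ ·))
    (hd : ∀ c ∈ t, PySem.Chars.isdigit c = true) :
    pvDigitRuns t = pvSpecSum t :=
  pvRuns_aux t.length t le_rfl hs hd

-- count is the same after sorting
lemma pvSpecSum_sorted (s : List Char) :
    pvSpecSum (PySem.List.sorted s (fun c => c) false) = pvSpecSum s := by
  unfold pvSpecSum
  refine Finset.sum_congr rfl fun k _ => ?_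
  rw [(PySem.List.sorted_perm s (fun c => c) false).count_eq]

-- ===== VERDICT (by name: the statement is the Claim_ definition above) =====
set_option maxHeartbeats 1600000 in
theorem f_spec : Claim_equal_f := by
  intro number _ hpre
  unfold Spec_f
  have hnn : ¬ number < 0 := not_lt.mpr hpre
  have hs : PySem.Int.toChars number = Nat.toDigits 10 number.toNat := by
    simp [PySem.Int.toChars, hnn]
  have hdig : ∀ c ∈ PySem.Int.toChars number, PySem.Chars.isdigit c = true := by
    rw [hs]; exact pvToDigits_digits _
  have hne : PySem.Int.toChars number ≠ [] := by rw [hs]; exact pvToDigits_ne_nil _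
  have hisd : PySem.Chars.strIsdigit (PySem.Int.toChars number) = true := by
    simp only [PySem.Chars.strIsdigit, Bool.and_eq_true, List.all_eq_true, Bool.not_eq_true',
      List.isEmpty_eq_false_iff]
    exact ⟨hne, hdig⟩
  have hB : f_alt number
      = pvDigitRuns (PySem.List.sorted (PySem.Int.toChars number) (fun c => c) false) := by
    simp only [f_alt, hisd, if_true]
  rw [hB, pvDigitRuns_sorted _
    (by simpa using PySem.List.sorted_pairwise (PySem.Int.toChars number) (fun c => c))
    (fun c hc => hdig c ((PySem.List.mem_sorted _ _ _ _).mp hc)), pvSpecSum_sorted]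
  simp only [f]
  rw [pvLoopA_eq _ hdig ⟨0, 0, 0, 0, 0, 0, 0, 0, 0, 0⟩]
  simp only [zero_add]
  unfold pvSpecSum
  rw [show (10 : Nat) = 9 + 1 from rfl]
  repeat rw [Finset.sum_range_succ]
  rw [Finset.sum_range_zero]
  rw [show pvDchar 0 = '0' from rfl, show pvDchar 1 = '1' from rfl,
    show pvDchar 2 = '2' from rfl, show pvDchar 3 = '3' from rfl,
    show pvDchar 4 = '4' from rfl, show pvDchar 5 = '5' from rfl,
    show pvDchar 6 = '6' from rfl, show pvDchar 7 = '7' from rfl,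
    show pvDchar 8 = '8' from rfl, show pvDchar 9 = '9' from rfl]
  unfold pvW
  split_ifs <;> push_cast <;> ring
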